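-- pv_equiv track=rewrite | github.com/doc-sheet/sentry-launchpad | src/launchpad/size/insights/common/duplicate_files.py | _is_under_any
-- ===== SOURCE A (Python) =====
-- def _is_under_any(path: str, containers: set[str]) -> bool:
--     """Check if path or any of its parents are in containers (O(path_depth))."""
--     if path in containers:
--         return True
--     # Walk up parent hierarchy: "a/b/c" checks "a" then "a/b"
--     parts = path.split("/")
--     for depth in range(1, len(parts)):
--         parent_path = "/".join(parts[:depth])
--         if parent_path in containers:
--             return True
--     return False
-- ===== SOURCE B (Python) =====
-- def _is_under_any(path: str, containers: set[str]) -> bool: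
--     """Check if path or any of its parents are in containers (O(path_depth))."""
--     current = path
--     while True:
--         if current in containers:
--             return True
--         idx = current.rfind("/")
--         if idx == -1:
--             return False
--         current = current[:idx]
-- ===== Notes on version B (the rewrite author's own statement) =====
-- stated objective: simpler
-- what changed: Instead of splitting the path into parts and re-joining prefixes front-to-back, B walks up the ancestor chain by truncating at the last '/' (rfind), visiting the same prefix set in the opposite order with no list building.
import Mathlib
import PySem

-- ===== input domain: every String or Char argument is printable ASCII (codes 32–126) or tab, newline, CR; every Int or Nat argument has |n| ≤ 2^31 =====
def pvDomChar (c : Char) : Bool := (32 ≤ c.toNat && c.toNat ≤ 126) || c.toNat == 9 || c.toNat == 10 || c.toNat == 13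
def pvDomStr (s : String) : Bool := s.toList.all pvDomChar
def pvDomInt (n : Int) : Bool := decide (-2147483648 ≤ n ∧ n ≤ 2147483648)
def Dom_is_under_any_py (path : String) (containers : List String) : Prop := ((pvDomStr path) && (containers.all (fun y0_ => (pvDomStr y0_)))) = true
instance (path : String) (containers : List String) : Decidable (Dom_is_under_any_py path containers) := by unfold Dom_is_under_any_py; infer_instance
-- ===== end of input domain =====

-- B walks up the ancestor chain by truncating at the last '/' (rfind) instead of
-- splitting into parts and re-joining prefixes front-to-back; same results, no list building.

-- ===== PORT A =====
-- 'for depth in range(1, len(parts)): if "/".join(parts[:depth]) in containers: return True' / 'return False'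
-- is the .any over the same range; 'path in containers' on the set is List.contains.
def is_under_any_py (path : String) (containers : List String) : Bool :=
  if containers.contains path then true
  else
    match PySem.Str.split? path "/" with
    | none => false  -- unreachable: the separator "/" is nonempty
    | some parts =>
      (PySem.List.pyRange 1 (parts.length : Int)).any (fun depth =>
        containers.contains (PySem.Str.join "/" (PySem.List.slice parts none (some depth))))

-- ===== PORT B =====
-- termination helper: a non-(-1) rfind result is a nonnegative index strictly below the length
theorem pvRfindGo_cases (s sub : List Char) :
    ∀ k : Nat, PySem.Chars.rfind.go s sub k = -1 ∨
      ∃ j : Nat, PySem.Chars.rfind.go s sub k = (j : Int) ∧ j ≤ k ∧ sub.isPrefixOf (s.drop j) = true := by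
  intro k
  induction k with
  | zero =>
    by_cases h : sub.isPrefixOf s = true
    · exact Or.inr ⟨0, by simp [PySem.Chars.rfind.go.eq_1, h], Nat.le_refl 0, by simpa using h⟩
    · exact Or.inl (by simp [PySem.Chars.rfind.go.eq_1, h])
  | succ j ih =>
    by_cases h : sub.isPrefixOf (s.drop (j + 1)) = true
    · exact Or.inr ⟨j + 1, by simp [PySem.Chars.rfind.go.eq_2, h], Nat.le_refl _, h⟩
    · rcases ih with h1 | ⟨i, hi, hik, hip⟩
      · exact Or.inl (by simp [PySem.Chars.rfind.go.eq_2, h, h1])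
      · exact Or.inr ⟨i, by simp [PySem.Chars.rfind.go.eq_2, h, hi], Nat.le_succ_of_le hik, hip⟩

theorem pvRfind_pos (s : List Char) (h : PySem.Chars.rfind s ['/'] ≠ -1) :
    0 ≤ PySem.Chars.rfind s ['/'] ∧ (PySem.Chars.rfind s ['/']).toNat < s.length := by
  rcases pvRfindGo_cases s ['/'] s.length with h1 | ⟨j, hj, _, hp⟩
  · exact absurd h1 h
  · rw [PySem.Chars.rfind, hj]
    refine ⟨Int.natCast_nonneg j, ?_⟩
    have hd : s.drop j ≠ [] := by
      intro hnil
      rw [hnil] at hp; simp [List.isPrefixOf] at hp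
    have : j < s.length := by
      by_contra hge
      exact hd (List.drop_eq_nil_of_le (Nat.le_of_not_lt hge))
    simpa using this

def is_under_any_py_alt (path : String) (containers : List String) : Bool :=
  if containers.contains path then true
  else
    let idx := PySem.Str.rfind path "/"
    if idx = -1 then false
    else is_under_any_py_alt (PySem.Str.slice path none (some idx)) containers
termination_by path.toList.length
decreasing_by
  rename_i h
  have hr : PySem.Str.rfind path "/" = PySem.Chars.rfind path.toList ['/'] := by
    rw [PySem.Str.rfind_eq]; rfl
  have h' : PySem.Chars.rfind path.toList ['/'] ≠ -1 := by
    intro hc; exact h (by simpa [idx, hr] using hc)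
  obtain ⟨h0, hlt⟩ := pvRfind_pos path.toList h'
  show (PySem.Str.slice path none (some idx)).toList.length < path.toList.length
  simp only [idx, hr]
  rw [PySem.Str.toList_slice, PySem.Chars.slice_eq_listSlice, PySem.List.slice_to _ h0,
    List.length_take]
  have h2 : path.toList.length = path.length := by simp
  omega

-- ===== PRECONDITION & SPEC =====
def Spec_is_under_any_py (path : String) (containers : List String) (out : Bool) : Prop := out = is_under_any_py_alt path containers
instance (path : String) (containers : List String) (out : Bool) : Decidable (Spec_is_under_any_py path containers out) := by unfold Spec_is_under_any_py; infer_instance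

-- ===== CLAIM (what is proved, stated in full; the proofs are below) =====
def Claim_equal_is_under_any_py : Prop := ∀ (path : String) (containers : List String), Dom_is_under_any_py path containers → Spec_is_under_any_py path containers (is_under_any_py path containers)

-- ===== LEMMAS AND PROOFS =====
theorem pv_single_isPrefixOf (c : Char) (l : List Char) :
    ([c].isPrefixOf l = true) ↔ l.head? = some c := by
  rw [List.isPrefixOf_iff_prefix]
  cases l with
  | nil => simp
  | cons a t =>
    constructor
    · rintro ⟨r, hr⟩
      simp at hr
      simp [hr.1]
    · intro h
      simp at h
      exact ⟨t, by simp [h]⟩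

theorem pvSplitOn_ne_nil (c : Char) (s : List Char) : List.splitOn c s ≠ [] := by
  simp only [List.splitOn]; exact List.splitOnP_ne_nil _ _

-- the fuel-based splitOn.go is List.splitOn with the accumulators flushed
theorem pvSplitOnGo_eq (c : Char) :
    ∀ (fuel : Nat) (l cur : List Char) (acc : List (List Char)), l.length ≤ fuel →
      PySem.Chars.splitOn.go [c] fuel l cur acc
        = acc.reverse ++ List.modifyHead (cur.reverse ++ ·) (List.splitOn c l) := by
  intro fuel
  induction fuel with
  | zero =>
    intro l cur acc hl
    have : l = [] := List.eq_nil_of_length_eq_zero (Nat.le_zero.mp hl)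
    subst this
    rw [PySem.Chars.splitOn.go.eq_1]
    simp [List.splitOn_nil]
  | succ f ih =>
    intro l cur acc hl
    cases l with
    | nil =>
      rw [PySem.Chars.splitOn.go.eq_2 _ _ _ _ (by omega)]
      simp [List.splitOn_nil]
    | cons ch rest =>
      rw [PySem.Chars.splitOn.go.eq_3]
      by_cases h : [c].isPrefixOf (ch :: rest) = true
      · have hc : ch = c := by
          have := (pv_single_isPrefixOf c (ch :: rest)).mp h
          simpa using this
        subst hc
        simp only [h, if_pos]
        have hdrop : List.drop ([ch] : List Char).length (ch :: rest) = rest := by simp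
        rw [hdrop, ih rest [] (cur.reverse :: acc) (by simpa using Nat.le_of_succ_le_succ hl)]
        have hrw : List.splitOn ch (ch :: rest) = [] :: List.splitOn ch rest := by
          simp [List.splitOn, List.splitOnP_cons]
        rw [hrw]
        cases hsp : List.splitOn ch rest with
        | nil => exact absurd hsp (pvSplitOn_ne_nil _ _)
        | cons p ps => simp
      · have hc : ch ≠ c := by
          intro hcc; subst hcc
          exact h ((List.isPrefixOf_iff_prefix).mpr ⟨rest, rfl⟩)
        simp only [h, if_neg, Bool.false_eq_true, not_false_iff]
        rw [ih rest (ch :: cur) acc (by simpa using Nat.le_of_succ_le_succ hl)]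
        have hrw : List.splitOn c (ch :: rest)
            = List.modifyHead (List.cons ch) (List.splitOn c rest) := by
          simp [List.splitOn, List.splitOnP_cons, hc]
        rw [hrw, List.modifyHead_modifyHead]
        cases hsp : List.splitOn c rest with
        | nil => exact absurd hsp (pvSplitOn_ne_nil _ _)
        | cons p ps => simp

theorem pvSplitOn_eq (c : Char) (s : List Char) :
    PySem.Chars.splitOn s [c] = List.splitOn c s := by
  rw [PySem.Chars.splitOn, pvSplitOnGo_eq c (s.length + 1) s [] [] (Nat.le_succ _)]
  cases h : List.splitOn c s with
  | nil => exact absurd h (pvSplitOn_ne_nil _ _)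
  | cons p ps => simp

theorem pvSplitOn_not_mem (c : Char) : ∀ (s : List Char), ∀ p ∈ List.splitOn c s, c ∉ p := by
  intro s
  induction s with
  | nil => intro p hp; simp [List.splitOn, List.splitOnP_nil] at hp; simp [hp]
  | cons x xs ih =>
    intro p hp
    by_cases hx : x = c
    · subst hx
      rw [List.splitOn, List.splitOnP_cons] at hp
      simp at hp
      rcases hp with hp | hp
      · simp [hp]
      · exact ih p (by simpa [List.splitOn] using hp)
    · rw [List.splitOn, List.splitOnP_cons] at hp
      simp [hx] at hp
      cases hsp : List.splitOnP (fun a => a == c) xs with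
      | nil => exact absurd hsp (List.splitOnP_ne_nil _ _)
      | cons q qs =>
        rw [hsp] at hp
        simp at hp
        rcases hp with hp | hp
        · subst hp
          intro hmem
          rcases List.mem_cons.mp hmem with h1 | h1
          · exact hx h1.symm
          · exact ih q (by simp [List.splitOn, hsp]) h1
        · exact ih p (by simp [List.splitOn, hsp, hp])

-- rfind on a slash-free string / the last occurrence
theorem pvRfindGo_none (c : Char) (s : List Char) (hs : c ∉ s) :
    ∀ k : Nat, PySem.Chars.rfind.go s [c] k = -1 := by
  have hpre : ∀ j : Nat, ¬ ([c].isPrefixOf (s.drop j) = true) := by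
    intro j hj
    have hh := (pv_single_isPrefixOf c (s.drop j)).mp hj
    have hmem : c ∈ s.drop j := by
      cases hd : s.drop j with
      | nil => rw [hd] at hh; simp at hh
      | cons a t => rw [hd] at hh; simp at hh; simp [hh]
    exact hs (List.mem_of_mem_drop hmem)
  intro k
  induction k with
  | zero =>
    rw [PySem.Chars.rfind.go.eq_1]
    simpa using by simpa using hpre 0
  | succ j ih =>
    rw [PySem.Chars.rfind.go.eq_2]
    simp [hpre (j + 1), ih]

theorem pvRfind_none (c : Char) (s : List Char) (hs : c ∉ s) :
    PySem.Chars.rfind s [c] = -1 := pvRfindGo_none c s hs _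

theorem pvRfindGo_last (c : Char) (t u : List Char) (hu : c ∉ u) :
    ∀ k : Nat, t.length ≤ k → PySem.Chars.rfind.go (t ++ c :: u) [c] k = (t.length : Int) := by
  have hat : [c].isPrefixOf ((t ++ c :: u).drop t.length) = true := by
    rw [List.drop_append_of_le_length (Nat.le_refl _), List.drop_eq_nil_of_le (Nat.le_refl _)]
    exact (List.isPrefixOf_iff_prefix).mpr ⟨u, rfl⟩
  have hafter : ∀ j : Nat, t.length < j → ¬ ([c].isPrefixOf ((t ++ c :: u).drop j) = true) := by
    intro j hj hp
    have hh := (pv_single_isPrefixOf c _).mp hp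
    rw [List.drop_append, List.drop_eq_nil_of_le (Nat.le_of_lt hj)] at hh
    have hcons : List.drop (j - t.length) (c :: u) = List.drop (j - t.length - 1) u := by
      obtain ⟨m, hm⟩ : ∃ m, j - t.length = m + 1 := ⟨j - t.length - 1, by omega⟩
      rw [hm, List.drop_succ_cons]
      congr 1
    rw [List.nil_append, hcons] at hh
    have hmem : c ∈ u.drop (j - t.length - 1) := by
      cases hd : u.drop (j - t.length - 1) with
      | nil => rw [hd] at hh; simp at hh
      | cons a v => rw [hd] at hh; simp at hh; simp [hh]
    exact hu (List.mem_of_mem_drop hmem)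
  intro k
  induction k with
  | zero =>
    intro hk
    have ht : t.length = 0 := Nat.le_zero.mp hk
    rw [PySem.Chars.rfind.go.eq_1]
    have : [c].isPrefixOf (t ++ c :: u) = true := by
      have := hat; rwa [ht, List.drop_zero] at this
    simp [this, ht]
  | succ j ih =>
    intro hk
    rw [PySem.Chars.rfind.go.eq_2]
    by_cases hj : t.length = j + 1
    · have : [c].isPrefixOf (List.drop (j + 1) (t ++ c :: u)) = true := by
        have := hat; rwa [hj] at this
      simp [hj]
    · have hlt : t.length ≤ j := by omega
      have hno := hafter (j + 1) (by omega)
      simp only [hno, if_neg, Bool.false_eq_true, not_false_iff]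
      exact ih hlt

theorem pvRfind_last (c : Char) (t u : List Char) (hu : c ∉ u) :
    PySem.Chars.rfind (t ++ c :: u) [c] = (t.length : Int) := by
  apply pvRfindGo_last c t u hu
  simp

theorem pvIntercalate_cons_cons (q r : List Char) (rs : List (List Char)) :
    (['/'] : List Char).intercalate (q :: r :: rs) = q ++ '/' :: (['/'] : List Char).intercalate (r :: rs) := by
  have := PySem.Chars.join_cons_cons ['/'] q r rs
  simpa [PySem.Chars.join] using this

theorem pvIntercalate_concat : ∀ (qs : List (List Char)) (p : List Char), qs ≠ [] →
    (['/'] : List Char).intercalate (qs ++ [p]) = (['/'] : List Char).intercalate qs ++ '/' :: p := by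
  intro qs
  induction qs with
  | nil => intro p h; exact absurd rfl h
  | cons q rest ih =>
    intro p _
    cases rest with
    | nil => simp [List.intercalate]
    | cons r rs =>
      have h2 := ih p (by simp)
      rw [show ((q :: r :: rs) ++ [p] : List (List Char)) = q :: (r :: (rs ++ [p])) from rfl]
      rw [pvIntercalate_cons_cons q r (rs ++ [p])]
      rw [pvIntercalate_cons_cons q r rs]
      rw [show (r :: (rs ++ [p]) : List (List Char)) = (r :: rs) ++ [p] from rfl, h2]
      simp

-- characterization of port A: path itself, then "/"-joined prefixes of the split
def pvChk (C : List String) (l : List Char) : Bool := C.contains (String.ofList l)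

def pvAnc (C : List String) (l : List Char) : Bool :=
  pvChk C l || (List.range ((List.splitOn '/' l).length - 1)).any
      (fun k => pvChk C ((['/'] : List Char).intercalate ((List.splitOn '/' l).take (k + 1))))

theorem pvA_eq (path : String) (C : List String) :
    is_under_any_py path C = pvAnc C path.toList := by
  unfold is_under_any_py pvAnc pvChk
  rw [String.ofList_toList]
  cases hc : C.contains path with
  | true => rw [if_pos rfl, Bool.true_or]
  | false =>
    rw [if_neg (by simp), Bool.false_or]
    cases hsp : PySem.Str.split? path "/" with
    | none =>
      have hm := PySem.Str.split?_map path "/"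
      rw [hsp, PySem.Chars.split?.eq_1] at hm
      simp at hm
    | some parts =>
      simp only []
      have hparts : parts.map String.toList = List.splitOn '/' path.toList := by
        have hm := PySem.Str.split?_map path "/"
        rw [hsp, PySem.Chars.split?.eq_1] at hm
        simp at hm
        rw [hm, pvSplitOn_eq]
      have hlen : parts.length = (List.splitOn '/' path.toList).length := by
        rw [← hparts, List.length_map]
      rw [PySem.List.pyRange_one, List.any_map]
      have htn : ((parts.length : Int) - 1).toNat = (List.splitOn '/' path.toList).length - 1 := by
        rw [hlen]; omega
      rw [htn]
      apply PySem.List.any_congr_mem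
      intro k _
      simp only [Function.comp]
      have hslice : PySem.List.slice parts none (some (1 + (k : Int))) = parts.take (k + 1) := by
        rw [PySem.List.slice_to _ (by omega)]
        congr 1
        omega
      rw [hslice]
      have hjoin : PySem.Str.join "/" (parts.take (k + 1))
          = String.ofList ((['/'] : List Char).intercalate ((List.splitOn '/' path.toList).take (k + 1))) := by
        rw [← String.toList_inj, String.toList_ofList, PySem.Str.toList_join,
          show ("/" : String).toList = ['/'] from by decide]
        rw [PySem.Chars.join, List.map_take, hparts]
      rw [hjoin]

theorem pvMain (C : List String) : ∀ ps : List (List Char), ps ≠ [] → (∀ p ∈ ps, '/' ∉ p) →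
    pvAnc C ((['/'] : List Char).intercalate ps)
      = is_under_any_py_alt (String.ofList ((['/'] : List Char).intercalate ps)) C := by
  intro ps
  induction ps using List.reverseRecOn with
  | nil => intro h; exact absurd rfl h
  | append_singleton qs p ih =>
    intro _ hfree
    have hpfree : '/' ∉ p := hfree p (by simp)
    cases hqs : qs with
    | nil =>
      subst hqs
      have hl : (['/'] : List Char).intercalate [p] = p := by simp [List.intercalate]
      rw [List.nil_append, hl]
      have hsp : List.splitOn '/' p = [p] := by
        have := List.splitOn_intercalate [p] '/' (by simpa using hpfree) (by simp)
        rwa [hl] at this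
      unfold pvAnc pvChk
      rw [hsp]
      rw [is_under_any_py_alt]
      have hrf : PySem.Chars.rfind p ['/'] = -1 := pvRfind_none '/' p hpfree
      simp [hrf, show ("/" : String).toList = ['/'] from by decide]
    | cons q qs' =>
      rw [← hqs]
      have hqne : qs ≠ [] := by rw [hqs]; simp
      have hqsfree : ∀ x ∈ qs, '/' ∉ x := fun x hx => hfree x (by simp [hx])
      have hl : (['/'] : List Char).intercalate (qs ++ [p])
          = (['/'] : List Char).intercalate qs ++ '/' :: p := pvIntercalate_concat qs p hqne
      set t := (['/'] : List Char).intercalate qs with ht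
      rw [hl]
      have hspl : List.splitOn '/' (t ++ '/' :: p) = qs ++ [p] := by
        have := List.splitOn_intercalate (qs ++ [p]) '/'
          (by intro x hx
              rcases List.mem_append.mp hx with h1 | h1
              · exact hqsfree x h1
              · simp at h1; subst h1; exact hpfree)
          (by simp)
        rwa [hl] at this
      have hspt : List.splitOn '/' t = qs := by
        have := List.splitOn_intercalate qs '/' hqsfree hqne
        rwa [← ht] at this
      obtain ⟨m, hm⟩ : ∃ m, qs.length = m + 1 := by
        cases hqq : qs with
        | nil => exact absurd hqq hqne
        | cons a b => exact ⟨b.length, by simp⟩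
      -- the A side: last prefix is t, earlier prefixes are the prefixes of t
      unfold pvAnc pvChk
      rw [hspl]
      have hlen2 : (qs ++ [p]).length - 1 = m + 1 := by simp [hm]
      rw [hlen2, List.range_succ, List.any_append]
      have htake : List.take (m + 1) (qs ++ [p]) = qs := by
        rw [← hm]
        exact List.take_left
      have hlast : ([m].any fun k =>
            C.contains (String.ofList ((['/'] : List Char).intercalate (List.take (k + 1) (qs ++ [p])))))
          = C.contains (String.ofList t) := by
        simp only [List.any_cons, List.any_nil, Bool.or_false]
        rw [htake, ← ht]
      rw [hlast]
      have hstep : ((List.range m).any fun k =>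
            C.contains (String.ofList ((['/'] : List Char).intercalate (List.take (k + 1) (qs ++ [p])))))
          = ((List.range m).any fun k =>
            C.contains (String.ofList ((['/'] : List Char).intercalate (List.take (k + 1) qs)))) := by
        apply PySem.List.any_congr_mem
        intro k hk
        have hk1 : k + 1 ≤ qs.length := by
          have := List.mem_range.mp hk; omega
        rw [List.take_append_of_le_length hk1]
      rw [hstep]
      -- the B side: rfind finds the last slash, truncation yields t
      rw [is_under_any_py_alt]
      have hrf : PySem.Str.rfind (String.ofList (t ++ '/' :: p)) "/" = (t.length : Int) := by
        rw [PySem.Str.rfind_eq, String.toList_ofList,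
          show ("/" : String).toList = ['/'] from by decide]
        exact pvRfind_last '/' t p hpfree
      have harg : PySem.Str.slice (String.ofList (t ++ '/' :: p)) none (some ((t.length : Int)))
          = String.ofList t := by
        rw [← String.toList_inj, PySem.Str.toList_slice, String.toList_ofList, String.toList_ofList,
          PySem.Chars.slice_eq_listSlice, PySem.List.slice_to _ (by omega)]
        rw [show ((t.length : Int)).toNat = t.length from by omega]
        exact List.take_left
      have hih := ih hqne hqsfree
      unfold pvAnc pvChk at hih
      rw [hspt] at hih
      have hmm : qs.length - 1 = m := by omega
      rw [hmm] at hih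
      cases hcl : C.contains (String.ofList (t ++ '/' :: p)) with
      | true => rw [if_pos rfl, Bool.true_or]
      | false =>
        rw [if_neg (by simp), Bool.false_or]
        simp only [hrf]
        rw [if_neg (by omega)]
        rw [harg, ← hih]
        rw [Bool.or_comm]

-- ===== VERDICT (by name: the statement is the Claim_ definition above) =====
theorem is_under_any_py_spec : Claim_equal_is_under_any_py := by
  unfold Claim_equal_is_under_any_py
  intro path C _
  unfold Spec_is_under_any_py
  rw [pvA_eq]
  have h := pvMain C (List.splitOn '/' path.toList)
    (pvSplitOn_ne_nil '/' path.toList) (pvSplitOn_not_mem '/' path.toList)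
  rw [List.intercalate_splitOn] at h
  rw [h, String.ofList_toList]
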